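-- pv_equiv track=rewrite | github.com/Yggaz/AoC_archive | AoC_2015_20_1.py | sigma_bis
-- ===== SOURCE A (Python) =====
-- def sigma_bis(n:int) -> int:
--     s = n
--     tst = 2
--     while tst * tst <= n:
--         if n % tst == 0:
--             if tst * 50 >= n:
--                 s += tst
--             if tst * tst < n:
--                 tst_p = n // tst
--                 if tst_p * 50 >= n:
--                     s += tst_p
--         tst += 1
--     return s
-- ===== SOURCE B (Python) =====
-- def sigma_bis(n: int) -> int:
--     # A divisor d of n satisfies d*50 >= n exactly when its cofactor k = n//d
--     # is at most 50, so enumerate cofactors over the fixed range 2..50.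
--     total = n
--     for k in range(2, 51):
--         if k < n and n % k == 0:
--             total += n // k
--     return total
-- ===== Notes on version B (the rewrite author's own statement) =====
-- stated objective: faster
-- what changed: Instead of scanning all candidate divisors up to sqrt(n), B enumerates the cofactors k = n//d of the qualifying divisors over the fixed range 2..50 (a divisor d satisfies d*50 >= n exactly when its cofactor is at most 50), so B's loop has constant length regardless of n.
import Mathlib
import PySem

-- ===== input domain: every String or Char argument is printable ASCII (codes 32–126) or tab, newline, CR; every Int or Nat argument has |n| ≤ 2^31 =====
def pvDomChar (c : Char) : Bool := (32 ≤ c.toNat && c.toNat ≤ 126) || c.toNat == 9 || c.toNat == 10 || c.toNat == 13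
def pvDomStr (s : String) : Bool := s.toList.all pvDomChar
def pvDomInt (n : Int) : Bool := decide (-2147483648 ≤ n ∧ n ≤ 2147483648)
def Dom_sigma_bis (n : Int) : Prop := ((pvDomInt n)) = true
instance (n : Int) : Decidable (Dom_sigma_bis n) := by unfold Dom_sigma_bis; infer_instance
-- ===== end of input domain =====

-- B enumerates the ≤49 possible cofactors k = n//d of the qualifying divisors
-- (d*50 ≥ n iff the cofactor is ≤ 50) instead of scanning candidates up to sqrt(n).

-- ===== PORT A =====
-- literal port of A's while-loop: state (s, tst); terminates because tst grows past n
def sigmaLoopA (n s tst : Int) : Int :=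
  if h : tst * tst ≤ n then
    sigmaLoopA n
      (if PySem.Int.mod n tst = 0 then
        (let s2 : Int := if tst * 50 ≥ n then s + tst else s
         if tst * tst < n then
           (let tst_p := PySem.Int.floordiv n tst
            if tst_p * 50 ≥ n then s2 + tst_p else s2)
         else s2)
       else s)
      (tst + 1)
  else s
termination_by (n + 1 - tst).toNat
decreasing_by
  have h1 : tst ≤ tst ^ 2 := Int.le_self_sq tst
  have h2 : tst ≤ n := by nlinarith
  omega

def sigma_bis (n : Int) : Int := sigmaLoopA n n 2

-- ===== PORT B =====
def sigma_bis_alt (n : Int) : Int :=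
  (PySem.List.pyRange 2 51 1).foldl
    (fun total k =>
      if k < n ∧ PySem.Int.mod n k = 0 then total + PySem.Int.floordiv n k else total) n

-- ===== PRECONDITION & SPEC =====
def Spec_sigma_bis (n : Int) (out : Int) : Prop := out = sigma_bis_alt n
instance (n : Int) (out : Int) : Decidable (Spec_sigma_bis n out) := by unfold Spec_sigma_bis; infer_instance

-- ===== CLAIM (what is proved, stated in full; the proofs are below) =====
def Claim_equal_sigma_bis : Prop := ∀ (n : Int), Dom_sigma_bis n → Spec_sigma_bis n (sigma_bis n)

-- ===== LEMMAS AND PROOFS =====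

-- contribution of one iteration of A's loop at candidate divisor t (for n = ↑m)
def contribA (m t : ℕ) : ℕ :=
  (if m % t = 0 ∧ m ≤ 50 * t then t else 0) +
  (if m % t = 0 ∧ t * t < m ∧ m ≤ 50 * (m / t) then m / t else 0)

lemma stepA (m t : ℕ) (s : Int) :
    (if PySem.Int.mod (↑m) (↑t) = 0 then
      (let s2 : Int := if (↑t : Int) * 50 ≥ (↑m : Int) then s + ↑t else s
       if (↑t : Int) * ↑t < (↑m : Int) then
         (let tst_p := PySem.Int.floordiv (↑m) (↑t)
          if tst_p * 50 ≥ (↑m : Int) then s2 + tst_p else s2)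
       else s2)
     else s) = s + ↑(contribA m t) := by
  simp only [PySem.Int.mod_natCast, PySem.Int.floordiv_natCast]
  rw [show ((t : ℕ) : Int) * 50 = ((t * 50 : ℕ) : Int) by push_cast; ring]
  rw [show ((t : ℕ) : Int) * ((t : ℕ) : Int) = ((t * t : ℕ) : Int) by push_cast; ring]
  rw [show ((m / t : ℕ) : Int) * 50 = ((m / t * 50 : ℕ) : Int) by push_cast; ring]
  simp only [ge_iff_le, Nat.cast_le, Nat.cast_lt, Nat.cast_eq_zero]
  unfold contribA
  generalize m % t = r
  generalize m / t = q
  split_ifs <;> push_cast <;> omega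

lemma loopA_char (m : ℕ) : ∀ (fuel t : ℕ), 2 ≤ t → Nat.sqrt m + 1 - t ≤ fuel → ∀ (s : Int),
    sigmaLoopA (↑m) s (↑t) = s + ↑(∑ x ∈ Finset.Ico t (Nat.sqrt m + 1), contribA m x) := by
  intro fuel
  induction fuel with
  | zero =>
    intro t ht hf s
    have hm : m < t * t := by
      have := Nat.le_sqrt.not.mp (by omega : ¬ t ≤ Nat.sqrt m); omega
    rw [sigmaLoopA, dif_neg (by exact_mod_cast not_le.mpr (by exact_mod_cast hm : (↑m : Int) < ↑t * ↑t))]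
    rw [Finset.Ico_eq_empty (by omega)]
    simp
  | succ fuel ih =>
    intro t ht hf s
    by_cases htt : t * t ≤ m
    · have hsq : t ≤ Nat.sqrt m := Nat.le_sqrt.mpr htt
      rw [sigmaLoopA, dif_pos (by exact_mod_cast htt : ((t : ℕ) : Int) * ↑t ≤ ↑m)]
      rw [show ((t : ℕ) : Int) + 1 = ((t + 1 : ℕ) : Int) by push_cast; ring]
      rw [ih (t + 1) (by omega) (by omega)]
      rw [stepA]
      rw [Finset.sum_eq_sum_Ico_succ_bot (by omega : t < Nat.sqrt m + 1)]
      push_cast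
      ring
    · have hlt : Nat.sqrt m < t := by
        by_contra hc; exact htt (Nat.le_sqrt.mp (by omega))
      rw [sigmaLoopA, dif_neg (by exact_mod_cast not_le.mpr (by exact_mod_cast (by omega : m < t * t) : (↑m : Int) < ↑t * ↑t))]
      rw [Finset.Ico_eq_empty (by omega)]
      simp

lemma loopB_char (m : ℕ) : ∀ (b : ℕ), 2 ≤ b → ∀ (s : Int),
    (PySem.List.pyRange 2 (↑b) 1).foldl
      (fun total k =>
        if k < (↑m : Int) ∧ PySem.Int.mod (↑m) k = 0 then total + PySem.Int.floordiv (↑m) k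
        else total) s
    = s + ↑(∑ k ∈ Finset.Ico 2 b, if k < m ∧ m % k = 0 then m / k else 0) := by
  intro b hb
  induction b, hb using Nat.le_induction with
  | base =>
    intro s
    rw [show ((2 : ℕ) : Int) = 2 by norm_num, PySem.List.pyRange_one_eq_nil (by omega)]
    simp
  | succ b hb ih =>
    intro s
    rw [show ((b + 1 : ℕ) : Int) = (↑b) + 1 by push_cast; ring,
        PySem.List.pyRange_one_succ_right (by exact_mod_cast hb : (2 : Int) ≤ ↑b),
        List.foldl_append, ih]
    rw [Finset.sum_Ico_succ_top (by omega : 2 ≤ b)]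
    simp only [List.foldl_cons, List.foldl_nil, PySem.Int.mod_natCast, PySem.Int.floordiv_natCast]
    by_cases hc : b < m ∧ m % b = 0
    · rw [if_pos ⟨by exact_mod_cast hc.1, by exact_mod_cast hc.2⟩, if_pos hc]
      push_cast; ring
    · rw [if_neg (fun hcon => hc ⟨by exact_mod_cast hcon.1, by exact_mod_cast hcon.2⟩), if_neg hc]
      push_cast; ring

-- the heart: A's divisor-pair sum equals B's cofactor sum, for every m : ℕ
lemma sum_core (m : ℕ) :
    (∑ t ∈ Finset.Ico 2 (Nat.sqrt m + 1), contribA m t)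
    = ∑ k ∈ Finset.Ico 2 51, (if k < m ∧ m % k = 0 then m / k else 0) := by
  have hA : (∑ t ∈ Finset.Ico 2 (Nat.sqrt m + 1), contribA m t)
      = (∑ t ∈ (Finset.Ico 2 (Nat.sqrt m + 1)).filter
            (fun t => m % t = 0 ∧ m ≤ 50 * t), t)
        + ∑ t ∈ (Finset.Ico 2 (Nat.sqrt m + 1)).filter
            (fun t => m % t = 0 ∧ t * t < m ∧ m ≤ 50 * (m / t)), m / t := by
    unfold contribA
    rw [Finset.sum_add_distrib, Finset.sum_filter, Finset.sum_filter]
  have hB : (∑ k ∈ Finset.Ico 2 51, (if k < m ∧ m % k = 0 then m / k else 0))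
      = ∑ k ∈ (Finset.Ico 2 51).filter (fun k => k < m ∧ m % k = 0), m / k :=
    (Finset.sum_filter _ _).symm
  rw [hA, hB]
  rw [← Finset.sum_filter_add_sum_filter_not
        ((Finset.Ico 2 51).filter (fun k => k < m ∧ m % k = 0)) (fun k => k * k < m)]
  have hpart2 : (Finset.Ico 2 (Nat.sqrt m + 1)).filter
        (fun t => m % t = 0 ∧ t * t < m ∧ m ≤ 50 * (m / t))
      = ((Finset.Ico 2 51).filter (fun k => k < m ∧ m % k = 0)).filter
        (fun k => k * k < m) := by
    ext t
    simp only [Finset.mem_filter, Finset.mem_Ico]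
    constructor
    · rintro ⟨⟨h2, _⟩, hmod, htt, h50⟩
      have hq : m / t * t = m := Nat.div_mul_cancel (Nat.dvd_of_mod_eq_zero hmod)
      have hq0 : 0 < m / t := by
        rcases Nat.eq_zero_or_pos (m / t) with h | h
        · rw [h, Nat.zero_mul] at hq; omega
        · exact h
      have ht50 : t ≤ 50 := by nlinarith
      have htm : t < m := by nlinarith
      exact ⟨⟨⟨h2, by omega⟩, htm, hmod⟩, htt⟩
    · rintro ⟨⟨⟨h2, h51⟩, hkm, hmod⟩, htt⟩
      have hq : m / t * t = m := Nat.div_mul_cancel (Nat.dvd_of_mod_eq_zero hmod)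
      have hq0 : 0 < m / t := by
        rcases Nat.eq_zero_or_pos (m / t) with h | h
        · rw [h, Nat.zero_mul] at hq; omega
        · exact h
      have hsq : t ≤ Nat.sqrt m := Nat.le_sqrt.mpr (by omega)
      exact ⟨⟨h2, by omega⟩, hmod, htt, by nlinarith⟩
  have hbij : (∑ t ∈ (Finset.Ico 2 (Nat.sqrt m + 1)).filter
        (fun t => m % t = 0 ∧ m ≤ 50 * t), t)
      = ∑ k ∈ ((Finset.Ico 2 51).filter (fun k => k < m ∧ m % k = 0)).filter
        (fun k => ¬ k * k < m), m / k := by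
    refine Finset.sum_nbij' (fun t => m / t) (fun k => m / k) ?_ ?_ ?_ ?_ ?_
    · intro t ht
      simp only [Finset.mem_filter, Finset.mem_Ico] at ht ⊢
      obtain ⟨⟨h2, hup⟩, hmod, h50⟩ := ht
      have ht0 : 0 < t := by omega
      have htt : t * t ≤ m := Nat.le_sqrt.mp (by omega)
      have hq : m / t * t = m := Nat.div_mul_cancel (Nat.dvd_of_mod_eq_zero hmod)
      have hge : t ≤ m / t := (Nat.le_div_iff_mul_le ht0).mpr htt
      have hmodq : m % (m / t) = 0 := Nat.mod_eq_zero_of_dvd ⟨t, hq.symm⟩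
      obtain ⟨q, hq'⟩ : ∃ q, q = m / t := ⟨_, rfl⟩
      rw [← hq'] at hq hge hmodq ⊢
      clear hq'
      have hle50 : q ≤ 50 := by nlinarith
      have hlt : q < m := by nlinarith
      refine ⟨⟨⟨by omega, by omega⟩, hlt, hmodq⟩, by push_neg; nlinarith⟩
    · intro k hk
      simp only [Finset.mem_filter, Finset.mem_Ico] at hk ⊢
      obtain ⟨⟨⟨h2, h51⟩, hkm, hmod⟩, hkk⟩ := hk
      push_neg at hkk
      have hk0 : 0 < k := by omega
      have hq : m / k * k = m := Nat.div_mul_cancel (Nat.dvd_of_mod_eq_zero hmod)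
      have hmodq : m % (m / k) = 0 := Nat.mod_eq_zero_of_dvd ⟨k, hq.symm⟩
      obtain ⟨q, hq'⟩ : ∃ q, q = m / k := ⟨_, rfl⟩
      rw [← hq'] at hq hmodq ⊢
      clear hq'
      have hq2 : 2 ≤ q := by
        have h0 : q ≠ 0 := by intro h; rw [h, Nat.zero_mul] at hq; omega
        have h1 : q ≠ 1 := by intro h; rw [h, Nat.one_mul] at hq; omega
        omega
      have hqk : q ≤ k := by nlinarith
      have hsq : q ≤ Nat.sqrt m := Nat.le_sqrt.mpr (by nlinarith)
      exact ⟨⟨hq2, by omega⟩, hmodq, by nlinarith⟩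
    · intro t ht
      simp only [Finset.mem_filter, Finset.mem_Ico] at ht
      obtain ⟨⟨h2, hup⟩, hmod, h50⟩ := ht
      have htt : t * t ≤ m := Nat.le_sqrt.mp (by omega)
      have hm4 : 4 ≤ m := by nlinarith
      exact Nat.div_div_self (Nat.dvd_of_mod_eq_zero hmod) (by omega)
    · intro k hk
      simp only [Finset.mem_filter, Finset.mem_Ico] at hk
      obtain ⟨⟨⟨h2, h51⟩, hkm, hmod⟩, hkk⟩ := hk
      exact Nat.div_div_self (Nat.dvd_of_mod_eq_zero hmod) (by omega)
    · intro t ht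
      simp only [Finset.mem_filter, Finset.mem_Ico] at ht
      obtain ⟨⟨h2, hup⟩, hmod, h50⟩ := ht
      have htt : t * t ≤ m := Nat.le_sqrt.mp (by omega)
      have hm4 : 4 ≤ m := by nlinarith
      exact (Nat.div_div_self (Nat.dvd_of_mod_eq_zero hmod) (by omega)).symm
  rw [hpart2, hbij]
  exact add_comm _ _

lemma A_of_neg (n : Int) (h : n < 4) : sigma_bis n = n := by
  unfold sigma_bis
  rw [sigmaLoopA, dif_neg (by omega : ¬ (2 : Int) * 2 ≤ n)]

lemma B_of_lt_two (n : Int) (h : n < 2) : sigma_bis_alt n = n := by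
  unfold sigma_bis_alt
  have key : ∀ (l : List Int), (∀ k ∈ l, (2 : Int) ≤ k) → ∀ (s : Int),
      l.foldl (fun total k =>
        if k < n ∧ PySem.Int.mod n k = 0 then total + PySem.Int.floordiv n k else total) s = s := by
    intro l
    induction l with
    | nil => intro _ s; rfl
    | cons a l ih =>
      intro hall s
      simp only [List.foldl_cons]
      rw [if_neg (by have := hall a (by simp); intro hc; omega)]
      exact ih (fun k hk => hall k (by simp [hk])) s
  exact key _ (fun k hk => (PySem.List.mem_pyRange_one.mp hk).1) n

lemma equal_nonneg (m : ℕ) : sigma_bis (↑m) = sigma_bis_alt (↑m) := by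
  have hA : sigma_bis (↑m)
      = (↑m : Int) + ↑(∑ x ∈ Finset.Ico 2 (Nat.sqrt m + 1), contribA m x) := by
    have h := loopA_char m (Nat.sqrt m + 1) 2 (by omega) (by omega) (↑m)
    unfold sigma_bis
    rw [show ((2 : ℕ) : Int) = 2 by norm_num] at h
    exact h
  have hB : sigma_bis_alt (↑m)
      = (↑m : Int) + ↑(∑ k ∈ Finset.Ico 2 51, if k < m ∧ m % k = 0 then m / k else 0) := by
    have h := loopB_char m 51 (by omega) (↑m)
    unfold sigma_bis_alt
    rw [show ((51 : ℕ) : Int) = 51 by norm_num] at h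
    exact h
  rw [hA, hB, sum_core]

-- ===== VERDICT (by name: the statement is the Claim_ definition above) =====
theorem sigma_bis_spec : Claim_equal_sigma_bis := by
  intro n _
  unfold Spec_sigma_bis
  by_cases h : 0 ≤ n
  · obtain ⟨m, rfl⟩ := Int.eq_ofNat_of_zero_le h
    exact equal_nonneg m
  · rw [A_of_neg n (by omega), B_of_lt_two n (by omega)]
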